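-- pv_equiv track=rewrite | github.com/minjung03/COSPRO_Python | COS PRO 모의고사 2/ex02.py | solution
-- ===== SOURCE A (Python) =====
-- def solution(shoes_size):
--     answer = [0 for _ in range(6)]
--
--     for i in shoes_size :
--         if i=='7' :
--             answer[0]+=1
--         elif i == '7.5':
--             answer[1]+=1
--         elif i == '8':
--             answer[2]+=1
--         elif i == '8.5':
--             answer[3]+=1
--         elif i == '9':
--             answer[4]+=1
--         else:
--             answer[5]+=1
--
--     return answer
-- ===== SOURCE B (Python) =====
-- def solution(shoes_size):
--     bins = [shoes_size.count(s) for s in ('7', '7.5', '8', '8.5', '9')]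
--     bins.append(len(shoes_size) - sum(bins))
--     return bins
-- ===== Notes on version B (the rewrite author's own statement) =====
-- stated objective: alternative
-- what changed: Replaces A's single pass with a per-element if/elif branch chain and a mutable 6-slot array by staged whole-list passes: one list.count scan per known size (no branching, no accumulator array), with the catch-all bin derived arithmetically as len minus the sum of the known counts.
import Mathlib
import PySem

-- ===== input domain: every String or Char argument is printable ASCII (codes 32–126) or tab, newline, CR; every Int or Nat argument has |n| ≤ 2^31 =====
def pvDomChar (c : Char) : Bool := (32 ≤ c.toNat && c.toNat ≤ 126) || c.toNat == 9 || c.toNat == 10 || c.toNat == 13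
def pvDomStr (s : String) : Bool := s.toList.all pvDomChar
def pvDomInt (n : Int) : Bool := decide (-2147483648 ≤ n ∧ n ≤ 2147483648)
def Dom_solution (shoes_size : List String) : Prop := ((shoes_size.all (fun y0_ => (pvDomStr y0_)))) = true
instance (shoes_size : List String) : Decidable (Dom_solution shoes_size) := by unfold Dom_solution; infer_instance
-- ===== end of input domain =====

-- B replaces A's single-pass if/elif accumulator with staged passes: one list.count scan per
-- known size, and the catch-all bin computed as len minus the sum of the known counts (alternative).


-- ===== PORT A =====
-- one step of A's for-loop: the if/elif chain incrementing one slot of answer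
def solutionStep (answer : List Int) (i : String) : List Int :=
  if i = "7" then answer.set 0 (answer.getD 0 0 + 1)
  else if i = "7.5" then answer.set 1 (answer.getD 1 0 + 1)
  else if i = "8" then answer.set 2 (answer.getD 2 0 + 1)
  else if i = "8.5" then answer.set 3 (answer.getD 3 0 + 1)
  else if i = "9" then answer.set 4 (answer.getD 4 0 + 1)
  else answer.set 5 (answer.getD 5 0 + 1)

def solution (shoes_size : List String) : List Int :=
  shoes_size.foldl solutionStep ((List.range 6).map (fun _ => (0 : Int)))

-- ===== PORT B =====
def solution_alt (shoes_size : List String) : List Int :=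
  let bins : List Int :=
    ["7", "7.5", "8", "8.5", "9"].map (fun s => (PySem.List.count shoes_size s : Int))
  bins ++ [PySem.List.len shoes_size - bins.sum]

-- ===== PRECONDITION & SPEC =====
def Spec_solution (shoes_size : List String) (out : List Int) : Prop := out = solution_alt shoes_size
instance (shoes_size : List String) (out : List Int) : Decidable (Spec_solution shoes_size out) := by unfold Spec_solution; infer_instance

-- ===== CLAIM =====
def Claim_equal_solution : Prop := ∀ (shoes_size : List String), Dom_solution shoes_size → Spec_solution shoes_size (solution shoes_size)

-- ===== LEMMAS AND PROOFS =====

-- loop invariant: folding A's step over l adds the per-size counts to each slot,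
-- and the catch-all slot gets length minus the five known counts
theorem solution_foldl_inv (l : List String) (a0 a1 a2 a3 a4 a5 : Int) :
    l.foldl solutionStep [a0, a1, a2, a3, a4, a5] =
      [a0 + l.count "7", a1 + l.count "7.5", a2 + l.count "8", a3 + l.count "8.5",
       a4 + l.count "9",
       a5 + ((l.length : Int) - (l.count "7" + l.count "7.5" + l.count "8" + l.count "8.5" + l.count "9"))] := by
  induction l generalizing a0 a1 a2 a3 a4 a5 with
  | nil => simp
  | cons x t ih =>
    by_cases h0 : x = "7"
    · simp [solutionStep, h0, ih, List.count_cons]; push_cast; constructor <;> ring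
    · by_cases h1 : x = "7.5"
      · simp [solutionStep, h0, h1, ih, List.count_cons]; push_cast; constructor <;> ring
      · by_cases h2 : x = "8"
        · simp [solutionStep, h0, h1, h2, ih, List.count_cons]; push_cast; constructor <;> ring
        · by_cases h3 : x = "8.5"
          · simp [solutionStep, h0, h1, h2, h3, ih, List.count_cons]; push_cast; constructor <;> ring
          · by_cases h4 : x = "9"
            · simp [solutionStep, h0, h1, h2, h3, h4, ih]; push_cast; constructor <;> ring
            · simp [solutionStep, h0, h1, h2, h3, h4, ih]; push_cast; ring

-- ===== VERDICT =====
theorem solution_spec : Claim_equal_solution := by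
  intro l _
  unfold Spec_solution solution solution_alt
  simp [List.range_succ, solution_foldl_inv, PySem.List.count_eq, PySem.List.len_eq]
  ring
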